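-- pv_equiv track=rewrite | github.com/hongxing1986/- | pattern_library_v2.py | s8
-- ===== SOURCE A (Python) =====
-- from collections import Counter, defaultdict
--
-- def s8(train):  # 近10热+不在上期
--     last = set(train[-1]['zs'])
--     c = Counter()
--     for d in train[-10:]: c.update(d['zs'])
--     for z,_ in c.most_common():
--         if z not in last:
--             return z
--     return c.most_common(1)[0][0]
-- ===== SOURCE B (Python) =====
-- from collections import Counter
--
-- def s8(train):  # hottest over last 10 draws, preferring numbers absent from the last draw
--     last = set(train[-1]['zs'])
--     c = Counter()
--     for d in train[-10:]:
--         c.update(d['zs'])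
--     best_elig = best_all = None
--     for z, n in c.items():  # insertion order; strict '>' keeps the earliest max, like most_common's stable sort
--         if best_all is None or n > best_all[1]:
--             best_all = (z, n)
--         if z not in last and (best_elig is None or n > best_elig[1]):
--             best_elig = (z, n)
--     winner = best_elig or best_all
--     return winner[0]
-- ===== Notes on version B (the rewrite author's own statement) =====
-- stated objective: alternative
-- what changed: Replaces most_common()'s full stable sort plus a scan with a single linear pass over c.items() that keeps two running argmax accumulators (best eligible / best overall) using strict '>' to reproduce the stable tie-break.
import Mathlib
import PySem

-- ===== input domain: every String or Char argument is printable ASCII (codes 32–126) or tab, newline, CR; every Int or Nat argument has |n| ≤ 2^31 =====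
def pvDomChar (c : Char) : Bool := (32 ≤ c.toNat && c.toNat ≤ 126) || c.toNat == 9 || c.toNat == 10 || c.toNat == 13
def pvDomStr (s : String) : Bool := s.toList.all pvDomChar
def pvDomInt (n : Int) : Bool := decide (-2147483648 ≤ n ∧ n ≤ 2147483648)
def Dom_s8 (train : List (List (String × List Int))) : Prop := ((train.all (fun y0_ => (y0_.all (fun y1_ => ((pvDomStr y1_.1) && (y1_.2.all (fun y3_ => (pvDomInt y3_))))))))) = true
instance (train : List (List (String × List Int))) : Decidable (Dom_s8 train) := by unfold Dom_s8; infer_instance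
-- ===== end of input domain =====

-- B replaces A's most_common() stable sort + scan by one linear pass over c.items()
-- with two strict-'>' argmax accumulators (alternative algorithm, same result).


-- ===== PORT A =====
-- d['zs'] (first-match lookup in the association list); total form, 'zs' present under Pre_
def pvZs (d : List (String × List Int)) : List Int :=
  ((d.find? (fun p => p.1 == "zs")).map (fun p => p.2)).getD []

-- shared prefix of BOTH Pythons: c = Counter(); for d in train[-10:]: c.update(d['zs'])
def pvCounter (train : List (List (String × List Int))) : PySem.Dict Int Int :=
  (PySem.List.slice train (some (-10)) none).foldl
    (fun c d => (pvZs d).foldl (fun c z => c.modify z 0 (· + 1)) c) PySem.Dict.empty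

def s8 (train : List (List (String × List Int))) : Int :=
  let last : PySem.Set Int := PySem.Set.ofList (pvZs (PySem.List.pyGetD train (-1) []))
  let c := pvCounter train
  let mc := PySem.List.sorted c.items (fun p => p.2) true   -- c.most_common()
  match mc.find? (fun p => !(PySem.Set.contains last p.1)) with  -- for z,_ in …: if z not in last: return z
  | some p => p.1
  | none => (PySem.List.pyGetD mc 0 ((0 : Int), (0 : Int))).1   -- c.most_common(1)[0][0]

-- ===== PORT B =====
-- one step of B's loop over c.items(): update (best_elig, best_all) with strict '>'
def pvBest (last : PySem.Set Int) (st : Option (Int × Int) × Option (Int × Int)) (p : Int × Int) :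
    Option (Int × Int) × Option (Int × Int) :=
  let ba := match st.2 with
    | none => some p
    | some m => if m.2 < p.2 then some p else some m
  let be := if !(PySem.Set.contains last p.1) then
      match st.1 with
      | none => some p
      | some m => if m.2 < p.2 then some p else some m
    else st.1
  (be, ba)

def s8_alt (train : List (List (String × List Int))) : Int :=
  let last : PySem.Set Int := PySem.Set.ofList (pvZs (PySem.List.pyGetD train (-1) []))
  let c := pvCounter train
  let st := c.items.foldl (pvBest last) (none, none)
  match st.1.orElse (fun _ => st.2) with   -- winner = best_elig or best_all
  | some p => p.1
  | none => 0   -- unreachable under Pre_ (Python B raises TypeError here, A raises IndexError)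

-- ===== PRECONDITION & SPEC =====
-- Pre_ excludes exactly the inputs where Python A raises: empty train (IndexError),
-- a draw in train[-10:] without key 'zs' (KeyError), and an all-empty last-10 window
-- (empty Counter: the final most_common(1)[0] raises IndexError).
def Pre_s8 (train : List (List (String × List Int))) : Prop :=
  train ≠ [] ∧
  (∀ d ∈ PySem.List.slice train (some (-10)) none, (d.find? (fun p => p.1 == "zs")).isSome = true) ∧
  (PySem.List.slice train (some (-10)) none).flatMap pvZs ≠ []
instance (train : List (List (String × List Int))) : Decidable (Pre_s8 train) := by
  unfold Pre_s8; infer_instance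

def pvWitness_s8 : (List (List (String × List Int))) := [[("zs", [1, 2])], [("zs", [2])]]

def Spec_s8 (train : List (List (String × List Int))) (out : Int) : Prop := out = s8_alt train
instance (train : List (List (String × List Int))) (out : Int) : Decidable (Spec_s8 train out) := by unfold Spec_s8; infer_instance

-- ===== CLAIM (what is proved, stated in full; the proofs are below) =====
def Claim_equal_s8 : Prop := ∀ (train : List (List (String × List Int))), Dom_s8 train → Pre_s8 train → Spec_s8 train (s8 train)

-- ===== LEMMAS AND PROOFS =====

-- B's argmax step for one predicate
def pvStep (q : Int × Int → Bool) (acc : Option (Int × Int)) (x : Int × Int) : Option (Int × Int) :=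
  if q x then
    match acc with
    | none => some x
    | some m => if m.2 < x.2 then some x else some m
  else acc

-- B's combined fold is the pair of the two single-predicate argmax folds
theorem pvBest_fold (last : PySem.Set Int) (l : List (Int × Int))
    (a b : Option (Int × Int)) :
    l.foldl (pvBest last) (a, b) =
      (l.foldl (pvStep (fun p => !(PySem.Set.contains last p.1))) a,
       l.foldl (pvStep (fun _ => true)) b) := by
  induction l generalizing a b with
  | nil => rfl
  | cons x t ih =>
      simp only [List.foldl_cons, pvBest, pvStep]
      exact ih _ _

-- inserting x into a key-descending sorted list commutes find? with one argmax step
theorem pvFind_insertBy (q : Int × Int → Bool) (x : Int × Int) (ys : List (Int × Int))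
    (h : ys.Pairwise (fun a b => b.2 ≤ a.2)) :
    (PySem.List.insertBy (fun a b => decide (b.2 < a.2)) x ys).find? q =
      pvStep q (ys.find? q) x := by
  induction ys with
  | nil =>
      simp only [PySem.List.insertBy, pvStep]
      by_cases hq : q x = true
      · simp [List.find?_cons_of_pos hq, hq]
      · simp [List.find?_cons_of_neg hq, hq]
  | cons y t ih =>
      have hpw : t.Pairwise (fun a b => b.2 ≤ a.2) := h.tail
      have hy : ∀ m ∈ y :: t, m.2 ≤ y.2 := by
        intro m hm
        rcases List.mem_cons.mp hm with rfl | hm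
        · exact le_refl _
        · exact (List.pairwise_cons.mp h).1 m hm
      simp only [PySem.List.insertBy]
      by_cases hlt : y.2 < x.2
      · simp only [hlt, decide_true, if_true]
        -- inserted at the front: x :: y :: t
        cases hfind : (y :: t).find? q with
        | none =>
            by_cases hq : q x = true
            · rw [List.find?_cons_of_pos hq]
              simp [pvStep, hq]
            · rw [List.find?_cons_of_neg hq, hfind]
              simp [pvStep, hq]
        | some m =>
            have hm2 : m.2 < x.2 :=
              lt_of_le_of_lt (hy m (List.mem_of_find?_eq_some hfind)) hlt
            by_cases hq : q x = true
            · rw [List.find?_cons_of_pos hq]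
              simp [pvStep, hq, hm2]
            · rw [List.find?_cons_of_neg hq, hfind]
              simp [pvStep, hq]
      · have hdec : (decide (y.2 < x.2)) = false := by simp [hlt]
        simp only [hdec, Bool.false_eq_true, if_false]
        cases hqy : q y with
        | true =>
            rw [List.find?_cons_of_pos hqy, List.find?_cons_of_pos hqy]
            simp only [pvStep]
            by_cases hq : q x = true
            · simp [hq, not_lt.mpr (le_of_not_gt hlt)]
            · simp [hq]
        | false =>
            rw [List.find?_cons_of_neg (by simp [hqy]),
                List.find?_cons_of_neg (by simp [hqy])]
            exact ih hpw

-- find? on the descending stable sort = the strict-'>' argmax fold over the original list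
theorem pvFind_sorted (q : Int × Int → Bool) (l : List (Int × Int)) :
    (PySem.List.sorted l (fun p => p.2) true).find? q = l.foldl (pvStep q) none := by
  induction l using List.reverseRecOn with
  | nil => rfl
  | append_singleton t x ih =>
      have hs : PySem.List.sorted (t ++ [x]) (fun p : Int × Int => p.2) true =
          PySem.List.insertBy (fun a b => decide (b.2 < a.2)) x
            (PySem.List.sorted t (fun p : Int × Int => p.2) true) := by
        rw [PySem.List.sorted_rev_eq_foldl_insertBy, PySem.List.sorted_rev_eq_foldl_insertBy,
          List.foldl_append]
        rfl
      rw [hs, List.foldl_append, List.foldl_cons, List.foldl_nil,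
        pvFind_insertBy q x _ (PySem.List.sorted_pairwise_rev t _), ih]

-- the fallback: head of the sorted list = argmax with the always-true predicate
theorem pvHead_find (l : List (Int × Int)) :
    (PySem.List.pyGetD l 0 ((0 : Int), (0 : Int))).1 =
      (match l.find? (fun _ => true) with
       | some p => p.1
       | none => 0) := by
  cases l with
  | nil => rfl
  | cons h t => simp [PySem.List.pyGetD_zero_cons, List.find?]

-- ===== VERDICT (by name: the statement is the Claim_ definition above) =====
theorem s8_spec : Claim_equal_s8 := by
  intro train _ _
  unfold Spec_s8 s8 s8_alt
  simp only []
  rw [pvBest_fold, pvFind_sorted]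
  cases hE : (pvCounter train).items.foldl
      (pvStep (fun p => !(PySem.Set.contains
        (PySem.Set.ofList (pvZs (PySem.List.pyGetD train (-1) []))) p.1))) none with
  | some p => simp [Option.orElse]
  | none =>
      rw [pvHead_find, pvFind_sorted]
      simp [Option.orElse]
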